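-- pv_equiv track=rewrite | github.com/SuikaIbuki1/use_calude_auto | src/recognizers/ocr_recognizer.py | _bbox_to_coords
-- ===== SOURCE A (Python) =====
-- from typing import Optional, List, Dict, Any
--
-- def _bbox_to_coords(bbox: List[List[int]]) -> tuple:
--     """
--     Convert EasyOCR bbox to standard coordinates.
--
--     Args:
--         bbox: List of corner points
--
--     Returns:
--         Tuple of (x, y, width, height)
--     """
--     x_coords = [point[0] for point in bbox]
--     y_coords = [point[1] for point in bbox]
--
--     x = int(min(x_coords))
--     y = int(min(y_coords))
--     width = int(max(x_coords) - x)
--     height = int(max(y_coords) - y)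
--
--     return (x, y, width, height)
-- ===== SOURCE B (Python) =====
-- def _bbox_to_coords(bbox):
--     """Single pass over bbox maintaining running extremes (no intermediate lists)."""
--     if not bbox:
--         raise ValueError("empty bbox")
--     first = bbox[0]
--     min_x = max_x = first[0]
--     min_y = max_y = first[1]
--     for point in bbox[1:]:
--         px = point[0]
--         py = point[1]
--         if px < min_x:
--             min_x = px
--         if px > max_x:
--             max_x = px
--         if py < min_y:
--             min_y = py
--         if py > max_y:
--             max_y = py
--     x = int(min_x)
--     y = int(min_y)
--     return (x, y, int(max_x - x), int(max_y - y))
-- ===== Notes on version B (the rewrite author's own statement) =====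
-- stated objective: alternative
-- what changed: Replaces the two intermediate list comprehensions plus four separate min/max scans (six traversals, two temporary lists) with one explicit loop over bbox maintaining running min_x/max_x/min_y/max_y in O(1) extra space.
import Mathlib
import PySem

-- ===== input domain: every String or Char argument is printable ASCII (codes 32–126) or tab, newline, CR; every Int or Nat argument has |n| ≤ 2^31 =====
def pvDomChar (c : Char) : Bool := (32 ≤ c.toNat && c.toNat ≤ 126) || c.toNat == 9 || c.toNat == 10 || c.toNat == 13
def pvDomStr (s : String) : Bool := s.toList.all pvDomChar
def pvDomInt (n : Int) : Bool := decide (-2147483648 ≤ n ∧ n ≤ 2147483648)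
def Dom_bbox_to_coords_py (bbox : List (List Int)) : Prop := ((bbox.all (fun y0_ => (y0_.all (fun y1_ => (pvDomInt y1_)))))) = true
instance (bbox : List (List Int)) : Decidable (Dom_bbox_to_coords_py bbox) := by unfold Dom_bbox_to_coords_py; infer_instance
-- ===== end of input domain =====

-- B replaces A's two list comprehensions and four min/max scans by one loop with running extremes.
-- ===== PORT A =====
def bbox_to_coords_py (bbox : List (List Int)) : Int × Int × Int × Int :=
  let x_coords := bbox.map (fun point => (PySem.List.pyGet? point 0).getD 0)
  let y_coords := bbox.map (fun point => (PySem.List.pyGet? point 1).getD 0)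
  let x := (PySem.List.min? x_coords (fun v => v)).getD 0
  let y := (PySem.List.min? y_coords (fun v => v)).getD 0
  let width := (PySem.List.max? x_coords (fun v => v)).getD 0 - x
  let height := (PySem.List.max? y_coords (fun v => v)).getD 0 - y
  (x, y, width, height)

-- ===== PORT B =====
def bbox_to_coords_py_alt (bbox : List (List Int)) : Int × Int × Int × Int :=
  match bbox with
  | [] => (0, 0, 0, 0)   -- Python B raises ValueError here; excluded by Pre_
  | first :: rest =>
    let fx := (PySem.List.pyGet? first 0).getD 0
    let fy := (PySem.List.pyGet? first 1).getD 0
    let st := rest.foldl (fun (s : Int × Int × Int × Int) point =>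
      let px := (PySem.List.pyGet? point 0).getD 0
      let py := (PySem.List.pyGet? point 1).getD 0
      ((if px < s.1 then px else s.1),
       (if s.2.1 < px then px else s.2.1),
       (if py < s.2.2.1 then py else s.2.2.1),
       (if s.2.2.2 < py then py else s.2.2.2))) (fx, fx, fy, fy)
    (st.1, st.2.2.1, st.2.1 - st.1, st.2.2.2 - st.2.2.1)

-- ===== PRECONDITION & SPEC =====
-- Pre_ excludes the inputs on which the Python A raises: the empty list (min([]) is a
-- ValueError) and any point with fewer than 2 coordinates (point[0]/point[1] IndexError).
def Pre_bbox_to_coords_py (bbox : List (List Int)) : Prop :=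
  bbox ≠ [] ∧ (bbox.all (fun point => 2 ≤ point.length)) = true
instance (bbox : List (List Int)) : Decidable (Pre_bbox_to_coords_py bbox) := by unfold Pre_bbox_to_coords_py; infer_instance
def pvWitness_bbox_to_coords_py : List (List Int) := [[1, 5], [4, 2], [3, 3]]
def Spec_bbox_to_coords_py (bbox : List (List Int)) (out : Int × Int × Int × Int) : Prop := out = bbox_to_coords_py_alt bbox
instance (bbox : List (List Int)) (out : Int × Int × Int × Int) : Decidable (Spec_bbox_to_coords_py bbox out) := by unfold Spec_bbox_to_coords_py; infer_instance

-- ===== CLAIM (what is proved, stated in full; the proofs are below) =====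
def Claim_equal_bbox_to_coords_py : Prop := ∀ (bbox : List (List Int)), Dom_bbox_to_coords_py bbox → Pre_bbox_to_coords_py bbox → Spec_bbox_to_coords_py bbox (bbox_to_coords_py bbox)

-- ===== LEMMAS AND PROOFS =====

theorem pv_if_min (a b : Int) : (if b < a then b else a) = min a b := by
  rcases lt_or_ge b a with h | h
  · simp [h, min_eq_right h.le]
  · simp [not_lt.mpr h, min_eq_left h]

theorem pv_if_max (a b : Int) : (if a < b then b else a) = max a b := by
  rcases lt_or_ge a b with h | h
  · simp [h, max_eq_right h.le]
  · simp [not_lt.mpr h, max_eq_left h]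

-- the 4-tuple fold is componentwise running min / max
theorem pv_fold_split (rest : List (List Int)) (a b c d : Int) :
    rest.foldl (fun (s : Int × Int × Int × Int) point =>
      let px := (PySem.List.pyGet? point 0).getD 0
      let py := (PySem.List.pyGet? point 1).getD 0
      ((if px < s.1 then px else s.1),
       (if s.2.1 < px then px else s.2.1),
       (if py < s.2.2.1 then py else s.2.2.1),
       (if s.2.2.2 < py then py else s.2.2.2))) (a, b, c, d)
    = (rest.foldl (fun m point => min m ((PySem.List.pyGet? point 0).getD 0)) a,
       rest.foldl (fun m point => max m ((PySem.List.pyGet? point 0).getD 0)) b,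
       rest.foldl (fun m point => min m ((PySem.List.pyGet? point 1).getD 0)) c,
       rest.foldl (fun m point => max m ((PySem.List.pyGet? point 1).getD 0)) d) := by
  induction rest generalizing a b c d with
  | nil => rfl
  | cons p t ih =>
    simp only [List.foldl_cons]
    rw [← ih]
    simp [pv_if_min, pv_if_max]

theorem bbox_spec_aux (first : List Int) (rest : List (List Int)) :
    bbox_to_coords_py (first :: rest) = bbox_to_coords_py_alt (first :: rest) := by
  simp only [bbox_to_coords_py, bbox_to_coords_py_alt, List.map_cons,
    PySem.List.min?_id_cons, PySem.List.max?_id_cons, pv_fold_split,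
    List.foldl_map, Option.getD_some]

-- ===== VERDICT (by name: the statement is the Claim_ definition above) =====
theorem bbox_to_coords_py_spec : Claim_equal_bbox_to_coords_py := by
  intro bbox _ hpre
  unfold Spec_bbox_to_coords_py
  match bbox with
  | [] => exact absurd rfl hpre.1
  | first :: rest => exact bbox_spec_aux first rest
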